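-- pv_equiv track=rewrite | github.com/Burburton/amazing-async-dev | runtime/plan_aware_agent.py | get_blocker_safe_alternatives
-- ===== SOURCE A (Python) =====
-- from typing import Any
--
-- def get_blocker_safe_alternatives(
--     blocker_constraints: dict[str, Any],
--     task_queue: list[str],
-- ) -> list[str]:
--     """Get alternative tasks that can proceed despite blockers.
--
--     Args:
--         blocker_constraints: Blocker constraints from analyze_blocker_constraints()
--         task_queue: Current task queue
--
--     Returns:
--         Tasks that are safe to execute despite blockers
--     """
--     active_blockers = blocker_constraints.get("active_blockers", [])
--
--     if not active_blockers:
--         return task_queue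
--
--     # If blocked, identify tasks not dependent on blocked items
--     safe_tasks = []
--
--     blocked_items = [b.get("item", "").lower() for b in active_blockers]
--
--     for task in task_queue:
--         task_lower = task.lower()
--         is_safe = True
--
--         for blocked_item in blocked_items:
--             if blocked_item and blocked_item in task_lower:
--                 is_safe = False
--                 break
--
--         if is_safe:
--             safe_tasks.append(task)
--
--     return safe_tasks
-- ===== SOURCE B (Python) =====
-- def get_blocker_safe_alternatives(blocker_constraints, task_queue):
--     """Filter the queue by successive elimination: instead of testing each task
--     against every blocked item (A's inner loop with break), pair each task with
--     its lowercase form once and then let each non-empty blocked item filter the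
--     surviving pairs in turn."""
--     active_blockers = blocker_constraints.get("active_blockers", [])
--     if not active_blockers:
--         return task_queue
--     survivors = [(task, task.lower()) for task in task_queue]
--     for blocker in active_blockers:
--         item = blocker.get("item", "").lower()
--         if item:
--             survivors = [pair for pair in survivors if item not in pair[1]]
--     return [task for task, _ in survivors]
-- ===== Notes on version B (the rewrite author's own statement) =====
-- stated objective: alternative
-- what changed: Inverts the loop structure: instead of scanning every blocked item per task with a break, B pairs each task with its lowercase form once and then successively filters the survivor list once per non-empty blocked item.
import Mathlib
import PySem

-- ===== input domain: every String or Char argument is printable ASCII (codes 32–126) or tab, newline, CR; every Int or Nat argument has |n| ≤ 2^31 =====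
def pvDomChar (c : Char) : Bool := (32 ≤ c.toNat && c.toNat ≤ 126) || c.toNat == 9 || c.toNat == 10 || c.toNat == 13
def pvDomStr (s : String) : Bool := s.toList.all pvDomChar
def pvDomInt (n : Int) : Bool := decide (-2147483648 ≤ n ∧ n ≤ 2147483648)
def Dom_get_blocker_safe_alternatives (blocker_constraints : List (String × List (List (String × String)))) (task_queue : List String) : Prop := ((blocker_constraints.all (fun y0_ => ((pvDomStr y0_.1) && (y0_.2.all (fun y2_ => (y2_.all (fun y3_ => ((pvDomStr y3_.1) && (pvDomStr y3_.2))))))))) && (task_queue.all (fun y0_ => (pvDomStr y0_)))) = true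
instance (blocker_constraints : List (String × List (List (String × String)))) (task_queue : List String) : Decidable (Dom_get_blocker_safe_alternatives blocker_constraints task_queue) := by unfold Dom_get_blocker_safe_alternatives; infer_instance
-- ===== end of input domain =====

-- B inverts A's loop structure: one pass builds (task, task.lower()) pairs, then each
-- non-empty blocked item filters the survivor list in turn (objective: alternative).

-- ===== PORT A =====
-- A's inner 'for blocked_item in blocked_items: … break' as structural recursion
def pyIsSafe (blocked_items : List String) (task_lower : String) : Bool :=
  match blocked_items with
  | [] => true
  | bi :: rest =>
    if bi ≠ "" && PySem.Str.isIn bi task_lower then false else pyIsSafe rest task_lower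

def get_blocker_safe_alternatives (blocker_constraints : List (String × List (List (String × String)))) (task_queue : List String) : List String :=
  let active_blockers := PySem.Dict.getD (PySem.Dict.mk blocker_constraints) "active_blockers" []
  if active_blockers.isEmpty then task_queue
  else
    let blocked_items := active_blockers.map
      (fun b => PySem.Str.lower (PySem.Dict.getD (PySem.Dict.mk b) "item" ""))
    task_queue.foldl
      (fun safe_tasks task =>
        let task_lower := PySem.Str.lower task
        if pyIsSafe blocked_items task_lower then safe_tasks ++ [task] else safe_tasks)
      []

-- ===== PORT B =====
def get_blocker_safe_alternatives_alt (blocker_constraints : List (String × List (List (String × String)))) (task_queue : List String) : List String :=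
  let active_blockers := PySem.Dict.getD (PySem.Dict.mk blocker_constraints) "active_blockers" []
  if active_blockers.isEmpty then task_queue
  else
    let survivors0 := task_queue.map (fun task => (task, PySem.Str.lower task))
    let survivors := active_blockers.foldl
      (fun s b =>
        let item := PySem.Str.lower (PySem.Dict.getD (PySem.Dict.mk b) "item" "")
        if item ≠ "" then s.filter (fun pair => !(PySem.Str.isIn item pair.2)) else s)
      survivors0
    survivors.map Prod.fst

-- ===== PRECONDITION & SPEC =====
def Spec_get_blocker_safe_alternatives (blocker_constraints : List (String × List (List (String × String)))) (task_queue : List String) (out : List String) : Prop := out = get_blocker_safe_alternatives_alt blocker_constraints task_queue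
instance (blocker_constraints : List (String × List (List (String × String)))) (task_queue : List String) (out : List String) : Decidable (Spec_get_blocker_safe_alternatives blocker_constraints task_queue out) := by unfold Spec_get_blocker_safe_alternatives; infer_instance

-- ===== CLAIM (what is proved, stated in full; the proofs are below) =====
def Claim_equal_get_blocker_safe_alternatives : Prop := ∀ (blocker_constraints : List (String × List (List (String × String)))) (task_queue : List String), Dom_get_blocker_safe_alternatives blocker_constraints task_queue → Spec_get_blocker_safe_alternatives blocker_constraints task_queue (get_blocker_safe_alternatives blocker_constraints task_queue)

-- ===== LEMMAS AND PROOFS =====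

-- B's successive filtering over the blockers is one filter by A's safety test.
theorem foldl_filter_eq_filter_isSafe {α : Type} (f : α → String)
    (bs : List α) (s0 : List (String × String)) :
    bs.foldl
      (fun s b =>
        let item := f b
        if item ≠ "" then s.filter (fun pair => !(PySem.Str.isIn item pair.2)) else s)
      s0
    = s0.filter (fun pair => pyIsSafe (bs.map f) pair.2) := by
  induction bs generalizing s0 with
  | nil => simp [pyIsSafe]
  | cons b rest ih =>
    simp only [List.foldl_cons, List.map_cons]
    rw [ih]
    by_cases h : f b = ""
    · simp [h, pyIsSafe]
    · simp only [h, ne_eq, not_false_iff, if_pos, List.filter_filter]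
      apply List.filter_congr
      intro pair _
      simp only [pyIsSafe, ne_eq, h, not_false_iff, decide_true, Bool.true_and]
      cases PySem.Str.isIn (f b) pair.2 <;> simp

theorem get_blocker_safe_alternatives_spec' :
    ∀ (blocker_constraints : List (String × List (List (String × String)))) (task_queue : List String),
      get_blocker_safe_alternatives blocker_constraints task_queue
        = get_blocker_safe_alternatives_alt blocker_constraints task_queue := by
  intro bc tq
  unfold get_blocker_safe_alternatives get_blocker_safe_alternatives_alt
  simp only []
  by_cases h : (PySem.Dict.getD (PySem.Dict.mk bc) "active_blockers" ([] : List (List (String × String)))).isEmpty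
  · simp [h]
  · simp only [h, if_neg, Bool.not_eq_true]
    rw [foldl_filter_eq_filter_isSafe, PySem.List.foldl_append_if, List.filter_map]
    simp [Function.comp_def]

-- ===== VERDICT (by name: the statement is the Claim_ definition above) =====
theorem get_blocker_safe_alternatives_spec : Claim_equal_get_blocker_safe_alternatives := by
  intro bc tq _
  unfold Spec_get_blocker_safe_alternatives
  exact get_blocker_safe_alternatives_spec' bc tq
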